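-- pv_equiv track=rewrite | github.com/avneeshlingwal9/codes | html/Python/csa9.py | selective_complement
-- ===== SOURCE A (Python) =====
-- def exor(a,b):
--     if ((a == "1" and b =="0") or (a=="0" and b=="1")):
--         return "1"
--     elif ((a =="0" and b == "0" ) or ( a =="1" and b == "1")):
--         return "0"
--
-- def selective_complement(a,b):
--     b_1 = a[::-1]
--     b_2 = b[::-1]
--     res = ""
--     if len(a)>=len(b):
--         for i in range(len(b)):
--             res+=exor(b_1[i],b_2[i])
--         for i in range(len(b),len(a)):
--             res+=exor(b_1[i],"0")
--     if len(b)> len(a):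
--         for i in range(len(a)):
--             res+=exor(b_1[i],b_2[i])
--         for i in range(len(a),len(b)):
--             res+=exor("0",b_2[i])
--     return(res[::-1])
-- ===== SOURCE B (Python) =====
-- def selective_complement(a, b):
--     n = max(len(a), len(b))
--     if n == 0:
--         return ""
--     v = int(a or "0", 2) ^ int(b or "0", 2)
--     return format(v, "b").zfill(n)
-- ===== Notes on version B (the rewrite author's own statement) =====
-- stated objective: faster
-- what changed: Replaces the per-character XOR loops (reverse, two right-anchored index loops, reverse again) with integer arithmetic: parse both strings with int(.,2), XOR the two machine integers, and render the result back in binary zero-filled to the common length.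
import Mathlib
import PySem

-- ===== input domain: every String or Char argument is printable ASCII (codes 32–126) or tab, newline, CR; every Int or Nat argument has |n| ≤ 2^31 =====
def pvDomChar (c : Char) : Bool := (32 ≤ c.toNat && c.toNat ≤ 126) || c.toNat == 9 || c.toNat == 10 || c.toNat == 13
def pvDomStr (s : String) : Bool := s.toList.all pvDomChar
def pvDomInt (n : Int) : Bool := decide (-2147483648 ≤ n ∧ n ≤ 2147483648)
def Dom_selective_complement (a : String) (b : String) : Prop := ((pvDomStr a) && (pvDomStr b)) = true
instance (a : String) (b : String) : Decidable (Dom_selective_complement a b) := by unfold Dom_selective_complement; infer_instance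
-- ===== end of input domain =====

-- B replaces A's per-character XOR loops by integer arithmetic: parse both strings in
-- base 2, XOR the two integers, render the result back in binary zero-filled to the
-- common length (faster: no per-character string concatenation).

-- ===== PORT A =====
-- Python's exor works on one-character strings (s[i]); ported on Char.
-- It returns None on non-binary characters, which makes the caller raise TypeError
-- on 'res += None': those inputs are excluded by Pre_ below, so the
-- 'none' branch is modelled by appending nothing ((….map [·]).getD []).
def exor (x : Char) (y : Char) : Option Char :=
  if (x = '1' ∧ y = '0') ∨ (x = '0' ∧ y = '1') then some '1'
  else if (x = '0' ∧ y = '0') ∨ (x = '1' ∧ y = '1') then some '0'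
  else none

def selective_complement (a : String) (b : String) : String :=
  let b_1 : List Char := a.toList.reverse        -- a[::-1]
  let b_2 : List Char := b.toList.reverse        -- b[::-1]
  let res : List Char := []
  let res :=
    if a.toList.length ≥ b.toList.length then
      let res := (PySem.List.pyRange 0 (b.toList.length : Int) 1).foldl
        (fun r i => r ++ ((exor (PySem.List.pyGetD b_1 i ' ') (PySem.List.pyGetD b_2 i ' ')).map (fun c => [c])).getD []) res
      (PySem.List.pyRange (b.toList.length : Int) (a.toList.length : Int) 1).foldl
        (fun r i => r ++ ((exor (PySem.List.pyGetD b_1 i ' ') '0').map (fun c => [c])).getD []) res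
    else res
  let res :=
    if b.toList.length > a.toList.length then
      let res := (PySem.List.pyRange 0 (a.toList.length : Int) 1).foldl
        (fun r i => r ++ ((exor (PySem.List.pyGetD b_1 i ' ') (PySem.List.pyGetD b_2 i ' ')).map (fun c => [c])).getD []) res
      (PySem.List.pyRange (a.toList.length : Int) (b.toList.length : Int) 1).foldl
        (fun r i => r ++ ((exor '0' (PySem.List.pyGetD b_2 i ' ')).map (fun c => [c])).getD []) res
    else res
  String.ofList res.reverse                      -- res[::-1]

-- ===== PORT B =====
-- int(s, 2): exact on the Pre_ domain (strings of '0'/'1' only); values are nonnegative,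
-- so Nat is the faithful carrier.
def pvIntBin (s : List Char) : Nat :=
  s.foldl (fun acc c => 2 * acc + (if c = '1' then 1 else 0)) 0

-- binary digits of v, most significant first ([] for 0); format(v, "b") = pvFormatB
def pvBits : Nat → List Char
  | 0 => []
  | v + 1 => pvBits ((v + 1) / 2) ++ [if (v + 1) % 2 = 1 then '1' else '0']
decreasing_by exact Nat.div_lt_self (by omega) (by omega)

def pvFormatB (v : Nat) : List Char := if v = 0 then ['0'] else pvBits v

-- s.zfill(n) for an unsigned digit string (no sign handling needed on Pre_)
def pvZfill (n : Nat) (s : List Char) : List Char := List.replicate (n - s.length) '0' ++ s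

def selective_complement_alt (a : String) (b : String) : String :=
  let n := max a.toList.length b.toList.length
  if n = 0 then ""
  else
    let v := (pvIntBin (if a.toList = [] then ['0'] else a.toList)) ^^^
             (pvIntBin (if b.toList = [] then ['0'] else b.toList))   -- int(a or "0",2) ^ int(b or "0",2)
    String.ofList (pvZfill n (pvFormatB v))

-- ===== PRECONDITION & SPEC =====
-- Pre_: both strings consist only of '0'/'1'; on any other character Python's exor
-- returns None and A raises TypeError (B's int(.,2) raises ValueError).
def Pre_selective_complement (a : String) (b : String) : Prop :=
  (a.toList.all (fun c => decide (c = '0' ∨ c = '1')) && b.toList.all (fun c => decide (c = '0' ∨ c = '1'))) = true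
instance (a : String) (b : String) : Decidable (Pre_selective_complement a b) := by
  unfold Pre_selective_complement; infer_instance

def pvWitness_selective_complement : String × String := ("101", "11")

def Spec_selective_complement (a : String) (b : String) (out : String) : Prop := out = selective_complement_alt a b
instance (a : String) (b : String) (out : String) : Decidable (Spec_selective_complement a b out) := by unfold Spec_selective_complement; infer_instance

-- ===== CLAIM (what is proved, stated in full; the proofs are below) =====
def Claim_equal_selective_complement : Prop := ∀ (a : String) (b : String), Dom_selective_complement a b → Pre_selective_complement a b → Spec_selective_complement a b (selective_complement a b)

-- ===== LEMMAS AND PROOFS =====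

-- character xor: the common value of exor on binary characters
def fxor (x y : Char) : Char := if x = y then '0' else '1'

theorem exor_eq_fxor {x y : Char} (hx : x = '0' ∨ x = '1') (hy : y = '0' ∨ y = '1') :
    exor x y = some (fxor x y) := by
  rcases hx with rfl | rfl <;> rcases hy with rfl | rfl <;> decide

theorem flatMap_congr_mem {α β : Type} (l : List α) (f g : α → List β)
    (h : ∀ x ∈ l, f x = g x) : l.flatMap f = l.flatMap g := by
  rw [List.flatMap_def, List.flatMap_def, List.map_congr_left h]

theorem flatMap_singleton_map {α : Type} (l : List α) (h : α → Char) :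
    l.flatMap (fun x => [h x]) = l.map h := by
  induction l with
  | nil => rfl
  | cons x l ih => simp [ih]

-- range over the SHORTER second list
theorem getD_range_map_zipWith_right (f : Char → Char → Char) (xs ys : List Char)
    (h : ys.length ≤ xs.length) :
    (List.range ys.length).map (fun k => f (xs.getD k ' ') (ys.getD k ' ')) = List.zipWith f xs ys := by
  induction ys generalizing xs with
  | nil => simp
  | cons y ys ih =>
    cases xs with
    | nil => simp at h
    | cons x xs =>
      simp only [List.length_cons, List.range_succ_eq_map, List.map_cons, List.map_map]
      simp only [List.getD_cons_zero, List.zipWith_cons_cons]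
      exact congrArg _ (ih xs (by simpa using h))

-- range over the SHORTER first list
theorem getD_range_map_zipWith_left (f : Char → Char → Char) (xs ys : List Char)
    (h : xs.length ≤ ys.length) :
    (List.range xs.length).map (fun k => f (xs.getD k ' ') (ys.getD k ' ')) = List.zipWith f xs ys := by
  induction xs generalizing ys with
  | nil => simp
  | cons x xs ih =>
    cases ys with
    | nil => simp at h
    | cons y ys =>
      simp only [List.length_cons, List.range_succ_eq_map, List.map_cons, List.map_map]
      simp only [List.getD_cons_zero, List.zipWith_cons_cons]
      exact congrArg _ (ih ys (by simpa using h))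

theorem getD_range_map_self (f : Char → Char) (xs : List Char) :
    (List.range xs.length).map (fun k => f (xs.getD k ' ')) = xs.map f := by
  induction xs with
  | nil => simp
  | cons x xs ih =>
    simp only [List.length_cons, List.range_succ_eq_map, List.map_cons, List.map_map]
    simp only [List.getD_cons_zero]
    exact congrArg _ ih

theorem map_fxor_replicate_right (xs : List Char) :
    xs.map (fun c => fxor c '0') = List.zipWith fxor xs (List.replicate xs.length '0') := by
  induction xs with
  | nil => simp
  | cons x xs ih =>
    simp only [List.map_cons, List.length_cons, List.replicate_succ, List.zipWith_cons_cons]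
    rw [ih]

theorem map_fxor_replicate_left (xs : List Char) :
    xs.map (fun c => fxor '0' c) = List.zipWith fxor (List.replicate xs.length '0') xs := by
  induction xs with
  | nil => simp
  | cons x xs ih =>
    simp only [List.map_cons, List.length_cons, List.replicate_succ, List.zipWith_cons_cons]
    rw [ih]

theorem zipWith_take_eq (f : Char → Char → Char) (xs ys : List Char) :
    List.zipWith f (xs.take ys.length) ys = List.zipWith f xs ys := by
  induction xs generalizing ys with
  | nil => simp
  | cons x xs ih =>
    cases ys with
    | nil => simp
    | cons y ys => simp [ih]

theorem zipWith_pad_right (f : Char → Char → Char) (xs ys zs : List Char) (n : Nat)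
    (hn : n = ys.length) (h : ys.length ≤ xs.length) :
    List.zipWith f xs (ys ++ zs) = List.zipWith f xs ys ++ List.zipWith f (xs.drop n) zs := by
  subst hn
  conv_lhs => rw [← List.take_append_drop ys.length xs]
  rw [List.zipWith_append (by simp [h]), zipWith_take_eq]

theorem zipWith_pad_left (f : Char → Char → Char) (xs ys zs : List Char) (n : Nat)
    (hn : n = xs.length) (h : xs.length ≤ ys.length) :
    List.zipWith f (xs ++ zs) ys = List.zipWith f xs ys ++ List.zipWith f zs (ys.drop n) := by
  rw [List.zipWith_comm, zipWith_pad_right _ _ _ _ n hn h, List.zipWith_comm (bs := xs),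
    List.zipWith_comm (bs := zs)]

theorem binary_getD {xs : List Char} (hx : ∀ c ∈ xs, c = '0' ∨ c = '1') {k : Nat}
    (hk : k < xs.length) : xs.getD k ' ' = '0' ∨ xs.getD k ' ' = '1' := by
  rw [List.getD_eq_getElem _ _ hk]
  exact hx _ (List.getElem_mem hk)

-- first loop, case len(a) ≥ len(b): XOR of the two reversed strings up to the shorter length
theorem segPair_right (xs ys : List Char) (nb : Int) (hnb : nb = (ys.length : Int))
    (hx : ∀ c ∈ xs, c = '0' ∨ c = '1') (hy : ∀ c ∈ ys, c = '0' ∨ c = '1')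
    (h : ys.length ≤ xs.length) :
    (PySem.List.pyRange 0 nb 1).flatMap
      (fun i => ((exor (PySem.List.pyGetD xs i ' ') (PySem.List.pyGetD ys i ' ')).map (fun c => [c])).getD [])
      = List.zipWith fxor xs ys := by
  subst hnb
  rw [PySem.List.pyRange_one, List.flatMap_map]
  simp only [sub_zero, Int.toNat_natCast, zero_add, PySem.List.pyGetD_natCast]
  rw [flatMap_congr_mem _ _ (fun k => [fxor (xs.getD k ' ') (ys.getD k ' ')]) ?_,
    flatMap_singleton_map, getD_range_map_zipWith_right _ _ _ h]
  intro k hk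
  have hky : k < ys.length := List.mem_range.1 hk
  rw [exor_eq_fxor (binary_getD hx (lt_of_lt_of_le hky h)) (binary_getD hy hky)]
  rfl

-- first loop, case len(b) > len(a)
theorem segPair_left (xs ys : List Char) (na : Int) (hna : na = (xs.length : Int))
    (hx : ∀ c ∈ xs, c = '0' ∨ c = '1') (hy : ∀ c ∈ ys, c = '0' ∨ c = '1')
    (h : xs.length ≤ ys.length) :
    (PySem.List.pyRange 0 na 1).flatMap
      (fun i => ((exor (PySem.List.pyGetD xs i ' ') (PySem.List.pyGetD ys i ' ')).map (fun c => [c])).getD [])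
      = List.zipWith fxor xs ys := by
  subst hna
  rw [PySem.List.pyRange_one, List.flatMap_map]
  simp only [sub_zero, Int.toNat_natCast, zero_add, PySem.List.pyGetD_natCast]
  rw [flatMap_congr_mem _ _ (fun k => [fxor (xs.getD k ' ') (ys.getD k ' ')]) ?_,
    flatMap_singleton_map, getD_range_map_zipWith_left _ _ _ h]
  intro k hk
  have hkx : k < xs.length := List.mem_range.1 hk
  rw [exor_eq_fxor (binary_getD hx hkx) (binary_getD hy (lt_of_lt_of_le hkx h))]
  rfl

-- second loop, case len(a) ≥ len(b): tail of the longer reversed string XOR "0"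
theorem segTail_right (xs : List Char) (n : Nat) (mI : Int) (hm : mI = (xs.length : Int))
    (hx : ∀ c ∈ xs, c = '0' ∨ c = '1') (hn : n ≤ xs.length) :
    (PySem.List.pyRange (n : Int) mI 1).flatMap
      (fun i => ((exor (PySem.List.pyGetD xs i ' ') '0').map (fun c => [c])).getD [])
      = (xs.drop n).map (fun c => fxor c '0') := by
  subst hm
  rw [PySem.List.pyRange_one, List.flatMap_map]
  have ht : ((xs.length : Int) - (n : Int)).toNat = xs.length - n := by omega
  rw [ht]
  have hgd : ∀ k : Nat, (n : Int) + (k : Int) = ((n + k : Nat) : Int) := fun k => by push_cast; ring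
  rw [flatMap_congr_mem _ _ (fun k => [fxor ((xs.drop n).getD k ' ') '0']) ?_,
    flatMap_singleton_map]
  · rw [← List.length_drop (i := n) (l := xs)]
    exact getD_range_map_self (fun c => fxor c '0') (xs.drop n)
  · intro k hk
    have hk' : k < xs.length - n := List.mem_range.1 hk
    have hdrop : (xs.drop n).getD k ' ' = xs.getD (n + k) ' ' := by
      rw [List.getD_eq_getElem?_getD, List.getD_eq_getElem?_getD, List.getElem?_drop]
    rw [hgd k, PySem.List.pyGetD_natCast,
      exor_eq_fxor (binary_getD hx (by omega)) (Or.inl rfl), ← hdrop]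
    rfl

-- second loop, case len(b) > len(a): "0" XOR tail of the longer reversed string
theorem segTail_left (ys : List Char) (n : Nat) (mI : Int) (hm : mI = (ys.length : Int))
    (hy : ∀ c ∈ ys, c = '0' ∨ c = '1') (hn : n ≤ ys.length) :
    (PySem.List.pyRange (n : Int) mI 1).flatMap
      (fun i => ((exor '0' (PySem.List.pyGetD ys i ' ')).map (fun c => [c])).getD [])
      = (ys.drop n).map (fun c => fxor '0' c) := by
  subst hm
  rw [PySem.List.pyRange_one, List.flatMap_map]
  have ht : ((ys.length : Int) - (n : Int)).toNat = ys.length - n := by omega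
  rw [ht]
  have hgd : ∀ k : Nat, (n : Int) + (k : Int) = ((n + k : Nat) : Int) := fun k => by push_cast; ring
  rw [flatMap_congr_mem _ _ (fun k => [fxor '0' ((ys.drop n).getD k ' ')]) ?_,
    flatMap_singleton_map]
  · rw [← List.length_drop (i := n) (l := ys)]
    exact getD_range_map_self (fun c => fxor '0' c) (ys.drop n)
  · intro k hk
    have hk' : k < ys.length - n := List.mem_range.1 hk
    have hdrop : (ys.drop n).getD k ' ' = ys.getD (n + k) ' ' := by
      rw [List.getD_eq_getElem?_getD, List.getD_eq_getElem?_getD, List.getElem?_drop]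
    rw [hgd k, PySem.List.pyGetD_natCast,
      exor_eq_fxor (Or.inl rfl) (binary_getD hy (by omega)), ← hdrop]
    rfl

-- A reaches zipWith fxor over the two left-padded character lists
theorem A_eq_zipWith (a b : String)
    (ha : ∀ c ∈ a.toList, c = '0' ∨ c = '1') (hb : ∀ c ∈ b.toList, c = '0' ∨ c = '1') :
    selective_complement a b = String.ofList (List.zipWith fxor
      (List.replicate (max a.toList.length b.toList.length - a.toList.length) '0' ++ a.toList)
      (List.replicate (max a.toList.length b.toList.length - b.toList.length) '0' ++ b.toList)) := by
  have hra : ∀ c ∈ a.toList.reverse, c = '0' ∨ c = '1' := fun c hc => ha c (List.mem_reverse.1 hc)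
  have hrb : ∀ c ∈ b.toList.reverse, c = '0' ∨ c = '1' := fun c hc => hb c (List.mem_reverse.1 hc)
  simp only [selective_complement]
  by_cases hge : a.toList.length ≥ b.toList.length
  · have hlt : ¬ (b.toList.length > a.toList.length) := by omega
    rw [if_pos hge, if_neg hlt]
    refine congrArg String.ofList ?_
    rw [PySem.List.foldl_append_eq_flatMap, PySem.List.foldl_append_eq_flatMap, List.nil_append,
      segPair_right (a.toList.reverse) (b.toList.reverse) _ (by simp) hra hrb (by simp only [List.length_reverse]; omega),
      segTail_right (a.toList.reverse) (b.toList.length) _ (by simp) hra (by simp only [List.length_reverse]; omega),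
      map_fxor_replicate_right]
    simp only [List.length_drop, List.length_reverse]
    rw [← zipWith_pad_right fxor (a.toList.reverse) (b.toList.reverse)
        (List.replicate (a.toList.length - b.toList.length) '0') (b.toList.length)
        (by simp) (by simp only [List.length_reverse]; omega),
      List.reverse_zipWith (by simp only [List.length_reverse, List.length_append, List.length_replicate]; omega)]
    simp only [List.reverse_reverse, List.reverse_append, List.reverse_replicate]
    have h1 : max a.toList.length b.toList.length - a.toList.length = 0 := by omega
    have h2 : max a.toList.length b.toList.length - b.toList.length
        = a.toList.length - b.toList.length := by omega
    rw [h1, h2]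
    simp
  · have hlt : b.toList.length > a.toList.length := by omega
    rw [if_neg hge, if_pos hlt]
    refine congrArg String.ofList ?_
    rw [PySem.List.foldl_append_eq_flatMap, PySem.List.foldl_append_eq_flatMap, List.nil_append,
      segPair_left (a.toList.reverse) (b.toList.reverse) _ (by simp) hra hrb (by simp only [List.length_reverse]; omega),
      segTail_left (b.toList.reverse) (a.toList.length) _ (by simp) hrb (by simp only [List.length_reverse]; omega),
      map_fxor_replicate_left]
    simp only [List.length_drop, List.length_reverse]
    rw [← zipWith_pad_left fxor (a.toList.reverse)
        (b.toList.reverse) (List.replicate (b.toList.length - a.toList.length) '0') (a.toList.length)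
        (by simp) (by simp only [List.length_reverse]; omega),
      List.reverse_zipWith (by simp only [List.length_reverse, List.length_append, List.length_replicate]; omega)]
    simp only [List.reverse_reverse, List.reverse_append, List.reverse_replicate]
    have h1 : max a.toList.length b.toList.length - a.toList.length
        = b.toList.length - a.toList.length := by omega
    have h2 : max a.toList.length b.toList.length - b.toList.length = 0 := by omega
    rw [h1, h2]
    simp

-- ---- B-side: binary value / rendering lemmas ----

theorem pvIntBin_append_singleton (s : List Char) (c : Char) :
    pvIntBin (s ++ [c]) = 2 * pvIntBin s + (if c = '1' then 1 else 0) := by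
  simp [pvIntBin, List.foldl_append]

theorem pvIntBin_replicate_zero_append (k : Nat) (s : List Char) :
    pvIntBin (List.replicate k '0' ++ s) = pvIntBin s := by
  induction k with
  | zero => simp
  | succ k ih =>
    rw [List.replicate_succ, List.cons_append]
    have h0 : pvIntBin ('0' :: (List.replicate k '0' ++ s)) = pvIntBin (List.replicate k '0' ++ s) := by
      simp [pvIntBin, List.foldl_cons]
    rw [h0, ih]

theorem nat_xor_bit (p q b1 b2 : Nat) (h1 : b1 < 2) (h2 : b2 < 2) :
    (2 * p + b1) ^^^ (2 * q + b2) = 2 * (p ^^^ q) + (b1 ^^^ b2) := by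
  have hb12 : b1 ^^^ b2 < 2 := by interval_cases b1 <;> interval_cases b2 <;> decide
  apply Nat.eq_of_testBit_eq
  intro i
  cases i with
  | zero =>
    rw [Nat.testBit_xor, Nat.testBit_zero, Nat.testBit_zero, Nat.testBit_zero]
    have m1 : (2 * p + b1) % 2 = b1 := by omega
    have m2 : (2 * q + b2) % 2 = b2 := by omega
    have m3 : (2 * (p ^^^ q) + (b1 ^^^ b2)) % 2 = b1 ^^^ b2 := by omega
    rw [m1, m2, m3]
    interval_cases b1 <;> interval_cases b2 <;> decide
  | succ i =>
    rw [Nat.testBit_xor, Nat.testBit_succ, Nat.testBit_succ, Nat.testBit_succ]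
    have e1 : (2 * p + b1) / 2 = p := by omega
    have e2 : (2 * q + b2) / 2 = q := by omega
    have e3 : (2 * (p ^^^ q) + (b1 ^^^ b2)) / 2 = p ^^^ q := by omega
    rw [e1, e2, e3, Nat.testBit_xor]

theorem bit_fxor {cx cy : Char} (hx : cx = '0' ∨ cx = '1') (hy : cy = '0' ∨ cy = '1') :
    ((if cx = '1' then 1 else 0) : Nat) ^^^ (if cy = '1' then 1 else 0)
      = (if fxor cx cy = '1' then 1 else 0) := by
  rcases hx with rfl | rfl <;> rcases hy with rfl | rfl <;> decide

theorem pvIntBin_zipWith_fxor (x y : List Char) (hlen : x.length = y.length)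
    (hx : ∀ c ∈ x, c = '0' ∨ c = '1') (hy : ∀ c ∈ y, c = '0' ∨ c = '1') :
    pvIntBin (List.zipWith fxor x y) = pvIntBin x ^^^ pvIntBin y := by
  induction x using List.reverseRecOn generalizing y with
  | nil =>
    have : y = [] := List.eq_nil_of_length_eq_zero (by simpa using hlen.symm)
    subst this; rfl
  | append_singleton x' cx ih =>
    cases y using List.reverseRecOn with
    | nil => simp at hlen
    | append_singleton y' cy =>
      have hl : x'.length = y'.length := by
        simp only [List.length_append, List.length_cons, List.length_nil] at hlen; omega
      rw [List.zipWith_append hl]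
      have hcx : cx = '0' ∨ cx = '1' := hx cx (by simp)
      have hcy : cy = '0' ∨ cy = '1' := hy cy (by simp)
      have hx' : ∀ c ∈ x', c = '0' ∨ c = '1' := fun c hc => hx c (by simp [hc])
      have hy' : ∀ c ∈ y', c = '0' ∨ c = '1' := fun c hc => hy c (by simp [hc])
      simp only [List.zipWith_cons_cons, List.zipWith_nil_right]
      rw [pvIntBin_append_singleton, pvIntBin_append_singleton, pvIntBin_append_singleton,
        ih y' hl hx' hy',
        nat_xor_bit _ _ _ _ (by split_ifs <;> omega) (by split_ifs <;> omega),
        bit_fxor hcx hcy]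

theorem pvIntBin_zero_eq_replicate (s : List Char) (hs : ∀ c ∈ s, c = '0' ∨ c = '1')
    (h0 : pvIntBin s = 0) : s = List.replicate s.length '0' := by
  induction s using List.reverseRecOn with
  | nil => rfl
  | append_singleton s' c ih =>
    rw [pvIntBin_append_singleton] at h0
    have hc : c = '0' := by
      rcases hs c (by simp) with rfl | rfl
      · rfl
      · simp at h0
    have hv : pvIntBin s' = 0 := by split_ifs at h0 <;> omega
    have hs' : ∀ c ∈ s', c = '0' ∨ c = '1' := fun c hc => hs c (by simp [hc])
    rw [ih hs' hv, hc]
    simp only [List.length_append, List.length_replicate, List.length_cons, List.length_nil]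
    rw [← List.replicate_succ']

theorem pvBits_eq (v : Nat) (hv : v ≠ 0) :
    pvBits v = pvBits (v / 2) ++ [if v % 2 = 1 then '1' else '0'] := by
  cases v with
  | zero => omega
  | succ v => rw [pvBits]

theorem pvBits_inverse (s : List Char) (hs : ∀ c ∈ s, c = '0' ∨ c = '1') :
    List.replicate (s.length - (pvBits (pvIntBin s)).length) '0' ++ pvBits (pvIntBin s) = s := by
  induction s using List.reverseRecOn with
  | nil => simp [pvIntBin, pvBits]
  | append_singleton s' c ih =>
    have hc : c = '0' ∨ c = '1' := hs c (by simp)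
    have hs' : ∀ c ∈ s', c = '0' ∨ c = '1' := fun c hc => hs c (by simp [hc])
    by_cases h0 : pvIntBin (s' ++ [c]) = 0
    · rw [h0]
      have := pvIntBin_zero_eq_replicate (s' ++ [c]) hs h0
      simpa [pvBits] using this.symm
    · rw [pvBits_eq _ h0, pvIntBin_append_singleton]
      have hdiv : (2 * pvIntBin s' + (if c = '1' then 1 else 0)) / 2 = pvIntBin s' := by
        split_ifs <;> omega
      have hmod : (2 * pvIntBin s' + (if c = '1' then 1 else 0)) % 2 = (if c = '1' then 1 else 0) := by
        split_ifs <;> omega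
      rw [hdiv, hmod]
      have hdig : (if (if c = '1' then (1:Nat) else 0) = 1 then '1' else '0') = c := by
        rcases hc with rfl | rfl <;> simp
      rw [hdig]
      have hlen : (s' ++ [c]).length - ((pvBits (pvIntBin s')).length + 1)
          = s'.length - (pvBits (pvIntBin s')).length := by
        simp only [List.length_append, List.length_cons, List.length_nil]; omega
      calc List.replicate ((s' ++ [c]).length - (pvBits (pvIntBin s') ++ [c]).length) '0'
            ++ (pvBits (pvIntBin s') ++ [c])
          = (List.replicate (s'.length - (pvBits (pvIntBin s')).length) '0'
            ++ pvBits (pvIntBin s')) ++ [c] := by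
            simp only [List.length_append, List.length_cons, List.length_nil]
            rw [List.append_assoc]
            congr 1
            congr 1
            omega
        _ = s' ++ [c] := by rw [ih hs']

-- B reaches the same zipWith fxor form
theorem alt_eq_zipWith (a b : String)
    (ha : ∀ c ∈ a.toList, c = '0' ∨ c = '1') (hb : ∀ c ∈ b.toList, c = '0' ∨ c = '1') :
    selective_complement_alt a b = String.ofList (List.zipWith fxor
      (List.replicate (max a.toList.length b.toList.length - a.toList.length) '0' ++ a.toList)
      (List.replicate (max a.toList.length b.toList.length - b.toList.length) '0' ++ b.toList)) := by
  set n := max a.toList.length b.toList.length with hn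
  set ap := List.replicate (n - a.toList.length) '0' ++ a.toList with hap
  set bp := List.replicate (n - b.toList.length) '0' ++ b.toList with hbp
  have hlap : ap.length = n := by
    simp only [hap, List.length_append, List.length_replicate]; omega
  have hlbp : bp.length = n := by
    simp only [hbp, List.length_append, List.length_replicate]; omega
  have hbap : ∀ c ∈ ap, c = '0' ∨ c = '1' := by
    intro c hc
    rcases List.mem_append.1 hc with h | h
    · exact Or.inl (List.eq_of_mem_replicate h)
    · exact ha c h
  have hbbp : ∀ c ∈ bp, c = '0' ∨ c = '1' := by
    intro c hc
    rcases List.mem_append.1 hc with h | h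
    · exact Or.inl (List.eq_of_mem_replicate h)
    · exact hb c h
  simp only [selective_complement_alt]
  by_cases h0 : n = 0
  · have ha0 : a.toList = [] := List.eq_nil_of_length_eq_zero (by omega)
    have hb0 : b.toList = [] := List.eq_nil_of_length_eq_zero (by omega)
    rw [← hn, if_pos h0]
    simp [hap, hbp, ha0, hb0, h0]
  · rw [← hn, if_neg h0]
    have hva : pvIntBin (if a.toList = [] then ['0'] else a.toList) = pvIntBin ap := by
      rw [hap, pvIntBin_replicate_zero_append]
      split_ifs with h
      · rw [h]; rfl
      · rfl
    have hvb : pvIntBin (if b.toList = [] then ['0'] else b.toList) = pvIntBin bp := by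
      rw [hbp, pvIntBin_replicate_zero_append]
      split_ifs with h
      · rw [h]; rfl
      · rfl
    rw [hva, hvb]
    set z := List.zipWith fxor ap bp with hz
    have hlz : z.length = n := by rw [hz, List.length_zipWith, hlap, hlbp, Nat.min_self]
    have hbz : ∀ c ∈ z, c = '0' ∨ c = '1' := by
      rw [hz]
      intro c hc
      obtain ⟨i, hi, rfl⟩ := List.mem_iff_getElem.1 hc
      rw [List.getElem_zipWith]
      unfold fxor; split_ifs <;> simp
    have hv : pvIntBin ap ^^^ pvIntBin bp = pvIntBin z :=
      (pvIntBin_zipWith_fxor ap bp (by omega) hbap hbbp).symm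
    rw [hv]
    refine congrArg String.ofList ?_
    have hinv : List.replicate (z.length - (pvBits (pvIntBin z)).length) '0'
        ++ pvBits (pvIntBin z) = z := pvBits_inverse z hbz
    unfold pvZfill pvFormatB
    split_ifs with hz0
    · -- value 0: format gives "0"; z is all zeros of length n ≥ 1
      have hrep : z = List.replicate n '0' := hlz ▸ pvIntBin_zero_eq_replicate z hbz hz0
      rw [hrep]
      simp only [List.length_cons, List.length_nil]
      conv_rhs => rw [show n = (n - 1) + 1 by omega, List.replicate_succ']
    · rw [← hlz]
      exact hinv

-- ===== VERDICT (by name: the statement is the Claim_ definition above) =====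
theorem selective_complement_spec : Claim_equal_selective_complement := by
  intro a b _hdom hpre
  unfold Spec_selective_complement
  unfold Pre_selective_complement at hpre
  rw [Bool.and_eq_true] at hpre
  have ha : ∀ c ∈ a.toList, c = '0' ∨ c = '1' := by
    intro c hc
    exact of_decide_eq_true (List.all_eq_true.1 hpre.1 c hc)
  have hb : ∀ c ∈ b.toList, c = '0' ∨ c = '1' := by
    intro c hc
    exact of_decide_eq_true (List.all_eq_true.1 hpre.2 c hc)
  rw [A_eq_zipWith a b ha hb, alt_eq_zipWith a b ha hb]
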